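-- pv_equiv track=rewrite | github.com/bolshakoVofficial/geek-brains-DataMining | hw4_scrapy/gbparse/items.py | fix_org_name
-- ===== SOURCE A (Python) =====
-- def fix_org_name(name: str):
--     result = name.split('">')
--     result = result[1][:-7]
--
--     if result.find('<!-- -->') != -1:
--         result = result.split('<!-- -->')
--
--     new_name = ''
--     for i in range(len(result)):
--         new_name += result[i]
--     return new_name
-- ===== SOURCE B (Python) =====
-- def fix_org_name(name: str):
--     return name.split('">')[1][:-7].replace('<!-- -->', '')
-- ===== Notes on version B (the rewrite author's own statement) =====
-- stated objective: simpler
-- what changed: Replaces the conditional split-into-list plus index-loop concatenation with a single str.replace call on the sliced substring, removing the branch and the loop entirely.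
import Mathlib
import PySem

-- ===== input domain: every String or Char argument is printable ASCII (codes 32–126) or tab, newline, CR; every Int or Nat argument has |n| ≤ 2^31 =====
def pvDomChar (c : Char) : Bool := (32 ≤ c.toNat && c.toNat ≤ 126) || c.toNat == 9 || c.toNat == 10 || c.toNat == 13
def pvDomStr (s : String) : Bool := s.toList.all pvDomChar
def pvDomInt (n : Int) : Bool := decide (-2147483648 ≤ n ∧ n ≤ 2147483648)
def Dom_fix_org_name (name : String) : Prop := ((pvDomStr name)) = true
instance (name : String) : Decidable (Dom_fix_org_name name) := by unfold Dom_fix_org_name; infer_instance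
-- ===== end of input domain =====

-- B replaces A's conditional split-into-list plus index-loop concatenation by one str.replace call (simpler; same cost).

-- ===== PORT A =====
-- Python A: result = name.split('">')[1][:-7]; if result.find('<!-- -->') != -1: result = result.split('<!-- -->');
-- then an index loop concatenates result's elements (list pieces, or the string's characters).
def fix_org_name (name : String) : String :=
  let r0 : List (List Char) := PySem.Chars.splitOn name.toList "\">".toList
  let r1 : List Char := PySem.Chars.slice (PySem.List.pyGetD r0 1 []) none (some (-7))
  if PySem.Chars.find r1 "<!-- -->".toList ≠ -1 then
    let parts := PySem.Chars.splitOn r1 "<!-- -->".toList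
    String.ofList ((PySem.List.pyRange 0 (PySem.List.len parts) 1).foldl
      (fun acc i => acc ++ PySem.List.pyGetD parts i []) [])
  else
    String.ofList ((PySem.List.pyRange 0 (PySem.List.len r1) 1).foldl
      (fun acc i => acc ++ [PySem.List.pyGetD r1 i ' ']) [])

-- ===== PORT B =====
def fix_org_name_alt (name : String) : String :=
  String.ofList (PySem.Chars.replace
    (PySem.Chars.slice (PySem.List.pyGetD (PySem.Chars.splitOn name.toList "\">".toList) 1 []) none (some (-7)))
    "<!-- -->".toList [])

-- ===== PRECONDITION & SPEC =====
-- Pre_ excludes exactly the inputs where '">' does not occur in name: there Python A (and B) raises IndexError on [1].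
def Pre_fix_org_name (name : String) : Prop := PySem.Str.isIn "\">" name = true
instance (name : String) : Decidable (Pre_fix_org_name name) := by unfold Pre_fix_org_name; infer_instance
def pvWitness_fix_org_name : String := "<a href=\"x\">Geek University<!-- --> U</a>abc"

def Spec_fix_org_name (name : String) (out : String) : Prop := out = fix_org_name_alt name
instance (name : String) (out : String) : Decidable (Spec_fix_org_name name out) := by unfold Spec_fix_org_name; infer_instance

-- ===== CLAIM (what is proved, stated in full; the proofs are below) =====
def Claim_equal_fix_org_name : Prop := ∀ (name : String), Dom_fix_org_name name → Pre_fix_org_name name → Spec_fix_org_name name (fix_org_name name)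

-- ===== LEMMAS AND PROOFS =====

-- replace.go accumulator factoring
theorem pv_rep_acc (old new : List Char) : ∀ (fuel : Nat) (l acc : List Char),
    PySem.Chars.replace.go old new fuel l acc = acc.reverse ++ PySem.Chars.replace.go old new fuel l [] := by
  intro fuel
  induction fuel with
  | zero => intro l acc; simp [PySem.Chars.replace.go]
  | succ f ih =>
    intro l acc
    cases l with
    | nil => simp [PySem.Chars.replace.go]
    | cons c t =>
      simp only [PySem.Chars.replace.go]
      split_ifs with h
      · rw [ih _ (new.reverse ++ acc), ih _ (new.reverse ++ [])]
        simp
      · rw [ih _ (c :: acc), ih _ [c]]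
        simp

-- flatten of splitOn.go equals replace-by-empty, fuel-independently (both fuels suffice)
theorem pv_go_eq (sep : List Char) : ∀ (f1 : Nat) (f2 : Nat) (l cur : List Char) (acc : List (List Char)),
    l.length ≤ f1 → l.length ≤ f2 → 1 ≤ sep.length →
    (PySem.Chars.splitOn.go sep f1 l cur acc).flatten
      = acc.reverse.flatten ++ cur.reverse ++ PySem.Chars.replace.go sep [] f2 l [] := by
  intro f1
  induction f1 with
  | zero =>
    intro f2 l cur acc h1 h2 hsep
    have : l = [] := by cases l <;> simp_all
    subst this
    cases f2 <;> simp [PySem.Chars.splitOn.go, PySem.Chars.replace.go]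
  | succ f ih =>
    intro f2 l cur acc h1 h2 hsep
    cases l with
    | nil =>
      cases f2 <;> simp [PySem.Chars.splitOn.go, PySem.Chars.replace.go]
    | cons c t =>
      cases f2 with
      | zero => simp at h2
      | succ g =>
        simp only [PySem.Chars.splitOn.go, PySem.Chars.replace.go]
        split_ifs with h
        · have hdrop : (List.drop sep.length (c :: t)).length ≤ f := by
            simp at h1 ⊢; omega
          have hdrop2 : (List.drop sep.length (c :: t)).length ≤ g := by
            simp at h2 ⊢; omega
          rw [ih g _ [] (cur.reverse :: acc) hdrop hdrop2 hsep]
          simp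
        · have ht : t.length ≤ f := by simp at h1; omega
          have ht2 : t.length ≤ g := by simp at h2; omega
          rw [ih g t (c :: cur) acc ht ht2 hsep]
          conv_rhs => rw [pv_rep_acc]
          simp
-- main bridge: concatenating the pieces of splitOn is replace-by-empty
theorem pv_flatten_splitOn (s sep : List Char) (hsep : sep ≠ []) :
    (PySem.Chars.splitOn s sep).flatten = PySem.Chars.replace s sep [] := by
  have h1 : 1 ≤ sep.length := by cases sep <;> simp_all
  rw [PySem.Chars.splitOn, PySem.Chars.replace]
  rw [if_neg (by simpa using hsep)]
  rw [pv_go_eq sep (s.length + 1) s.length s [] [] (by omega) (le_refl _) h1]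
  simp

-- when sep does not occur, replace-by-empty is the identity
theorem pv_replace_id (s sep : List Char) (h : ¬ sep <:+: s) :
    PySem.Chars.replace s sep [] = s := by
  have hsep : ¬ sep.isEmpty = true := by
    intro he
    exact h (by simp [List.isEmpty_iff] at he; simp [he])
  rw [PySem.Chars.replace, if_neg hsep]
  suffices H : ∀ (fuel : Nat) (l acc : List Char), l.length ≤ fuel → ¬ sep <:+: l →
      PySem.Chars.replace.go sep [] fuel l acc = acc.reverse ++ l by
    simpa using H s.length s [] (le_refl _) h
  intro fuel
  induction fuel with
  | zero =>
    intro l acc h1 _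
    simp [PySem.Chars.replace.go]
  | succ f ih =>
    intro l acc h1 hni
    cases l with
    | nil => simp [PySem.Chars.replace.go]
    | cons c t =>
      simp only [PySem.Chars.replace.go]
      rw [if_neg (by
        intro hp
        exact hni (List.isPrefixOf_iff_prefix.mp hp).isInfix)]
      rw [ih t (c :: acc) (by simp at h1; omega) (fun hinf => hni (hinf.trans (List.suffix_cons c t).isInfix))]
      simp

-- ===== VERDICT (by name: the statement is the Claim_ definition above) =====
theorem fix_org_name_spec : Claim_equal_fix_org_name := by
  intro name _ _
  unfold Spec_fix_org_name fix_org_name fix_org_name_alt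
  simp only [PySem.List.foldl_pyRange_zero_pyGetD, PySem.List.foldl_append_eq_flatten,
    List.nil_append]
  set r1 := PySem.Chars.slice (PySem.List.pyGetD (PySem.Chars.splitOn name.toList "\">".toList) 1 []) none (some (-7)) with hr1
  split_ifs with hf
  · rw [pv_flatten_splitOn r1 _ (by decide)]
  · have hni : ¬ "<!-- -->".toList <:+: r1 := by
      rw [← PySem.Chars.find_eq_neg_one_iff]
      omega
    rw [PySem.List.foldl_pyRange_zero_pyGetD r1 ' ' (fun acc c => acc ++ [c]) [],
      PySem.List.foldl_append_singleton_eq_self, List.nil_append, pv_replace_id r1 _ hni]
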